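-- pv_equiv track=rewrite | github.com/AdamZhouSE/pythonHomework | Code/CodeRecords/2738/60755/271100.py | solve
-- ===== SOURCE A (Python) =====
-- def judge(matrix,m,n,i,k):
--     for a in range(i):
--         for b in range(k):
--             if matrix[m+a][n+b]!="1":
--                 return False
--     return True
--
-- def solve(matrix,res):
--     for i in range(len(matrix)):
--         for k in range(len(matrix[0])):
--             for m in range(i+1):
--                 for n in range(k+1):
--                     if judge(matrix,m,n,len(matrix)-i,len(matrix[0])-k):
--                         res.append((len(matrix)-i)*(len(matrix[0])-k))
--     return res
-- ===== SOURCE B (Python) =====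
-- def solve(matrix, res):
--     R = len(matrix)
--     C = len(matrix[0]) if matrix else 0
--     pref = []
--     for r in range(R):
--         row = matrix[r]
--         rp = [0]
--         s = 0
--         for c in range(C):
--             s += 1 if row[c] == "1" else 0
--             rp.append(s)
--         pref.append(rp)
--     for h in range(R, 0, -1):
--         for w in range(C, 0, -1):
--             for m in range(R - h + 1):
--                 for n in range(C - w + 1):
--                     ok = True
--                     for a in range(h):
--                         if pref[m + a][n + w] - pref[m + a][n] != w:
--                             ok = False
--                             break
--                     if ok:
--                         res.append(h * w)
--     return res
-- ===== Notes on version B (the rewrite author's own statement) =====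
-- stated objective: alternative
-- what changed: B precomputes per-row prefix sums of ones once and verifies each candidate rectangle with one prefix-difference test per row, instead of A's cell-by-cell rescan of all h*w cells via judge(); both still enumerate all O(R^2 C^2) rectangles, so the measured end-to-end gain is only a modest constant.
import Mathlib
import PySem

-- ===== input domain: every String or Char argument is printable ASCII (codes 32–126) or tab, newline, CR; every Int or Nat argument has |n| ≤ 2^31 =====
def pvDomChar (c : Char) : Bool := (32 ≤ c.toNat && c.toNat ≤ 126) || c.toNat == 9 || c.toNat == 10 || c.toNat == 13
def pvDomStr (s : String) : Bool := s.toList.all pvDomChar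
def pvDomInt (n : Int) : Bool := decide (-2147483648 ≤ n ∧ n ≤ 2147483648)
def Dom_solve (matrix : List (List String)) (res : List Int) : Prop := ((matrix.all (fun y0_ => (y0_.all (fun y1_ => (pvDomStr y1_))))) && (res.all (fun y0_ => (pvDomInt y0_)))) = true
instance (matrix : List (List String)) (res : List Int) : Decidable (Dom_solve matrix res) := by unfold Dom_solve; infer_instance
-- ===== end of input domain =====

-- B replaces A's per-rectangle cell-by-cell rescan (judge) by per-row prefix sums of ones,
-- checking each rectangle with one prefix-difference test per row (an alternative algorithm;
-- both still enumerate every rectangle).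
-- Both Pythons mutate `res` in place identically (append); the theorem is about the returned value.

-- ===== PORT A =====
-- matrix[r][c], total via defaults; exact on Pre_solve inputs (all accesses in range there)
def pvCell (matrix : List (List String)) (r c : Int) : String :=
  PySem.List.pyGetD (PySem.List.pyGetD matrix r []) c ""

-- judge's early `return False` at the first non-"1" cell ported as the short-circuiting .all
def judge (matrix : List (List String)) (m n i k : Int) : Bool :=
  (PySem.List.pyRange 0 i 1).all fun a =>
    (PySem.List.pyRange 0 k 1).all fun b =>
      pvCell matrix (m + a) (n + b) == "1"

def solve (matrix : List (List String)) (res : List Int) : List Int :=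
  let R : Int := matrix.length
  let C : Int := (PySem.List.pyGetD matrix 0 []).length
  (PySem.List.pyRange 0 R 1).foldl (fun acc i =>
    (PySem.List.pyRange 0 C 1).foldl (fun acc k =>
      (PySem.List.pyRange 0 (i + 1) 1).foldl (fun acc m =>
        (PySem.List.pyRange 0 (k + 1) 1).foldl (fun acc n =>
          if judge matrix m n (R - i) (C - k) then acc ++ [(R - i) * (C - k)] else acc)
          acc) acc) acc) res

-- ===== PORT B =====
-- the rp/s accumulation loop of Source B, state (rp, s)
-- (Source B's 'len(matrix[0]) if matrix else 0' is pyGetD with default []: both give 0 on [])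
def rowPref (row : List String) (C : Int) : List Int :=
  ((PySem.List.pyRange 0 C 1).foldl
    (fun (st : List Int × Int) c =>
      let s := st.2 + (if PySem.List.pyGetD row c "" == "1" then (1 : Int) else 0)
      (st.1 ++ [s], s))
    ([0], 0)).1

-- Source B's break-on-mismatch row loop (ok flag) ported as the short-circuiting .all
def solve_alt (matrix : List (List String)) (res : List Int) : List Int :=
  let R : Int := matrix.length
  let C : Int := (PySem.List.pyGetD matrix 0 []).length
  let pref : List (List Int) :=
    (PySem.List.pyRange 0 R 1).foldl
      (fun acc r => acc ++ [rowPref (PySem.List.pyGetD matrix r []) C]) []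
  (PySem.List.pyRange R 0 (-1)).foldl (fun acc h =>
    (PySem.List.pyRange C 0 (-1)).foldl (fun acc w =>
      (PySem.List.pyRange 0 (R - h + 1) 1).foldl (fun acc m =>
        (PySem.List.pyRange 0 (C - w + 1) 1).foldl (fun acc n =>
          if (PySem.List.pyRange 0 h 1).all (fun a =>
                PySem.List.pyGetD (PySem.List.pyGetD pref (m + a) []) (n + w) 0
                  - PySem.List.pyGetD (PySem.List.pyGetD pref (m + a) []) n 0 == w)
          then acc ++ [h * w] else acc) acc) acc) acc) res

-- ===== PRECONDITION & SPEC =====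
-- Pre_ excludes exactly the inputs on which the Python A raises IndexError: a nonempty matrix
-- with a row shorter than row 0 (A always tests every 1x1 rectangle, so it indexes every cell of
-- the first C columns of every row); B raises IndexError there too.
def Pre_solve (matrix : List (List String)) (res : List Int) : Prop :=
  ∀ row ∈ matrix, (matrix.getD 0 []).length ≤ row.length
instance (matrix : List (List String)) (res : List Int) : Decidable (Pre_solve matrix res) := by
  unfold Pre_solve; infer_instance
def pvWitness_solve : List (List String) × List Int := ([["1", "0"], ["1", "1"]], [3])

def Spec_solve (matrix : List (List String)) (res : List Int) (out : List Int) : Prop := out = solve_alt matrix res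
instance (matrix : List (List String)) (res : List Int) (out : List Int) : Decidable (Spec_solve matrix res out) := by unfold Spec_solve; infer_instance

-- ===== CLAIM (what is proved, stated in full; the proofs are below) =====
def Claim_equal_solve : Prop := ∀ (matrix : List (List String)) (res : List Int), Dom_solve matrix res → Pre_solve matrix res → Spec_solve matrix res (solve matrix res)

-- ===== LEMMAS AND PROOFS =====

lemma all_congr_mem {α : Type} {l : List α} {f g : α → Bool}
    (h : ∀ x ∈ l, f x = g x) : l.all f = l.all g := by
  induction l with
  | nil => rfl
  | cons x t ih =>
    simp only [List.all_cons, h x (by simp), ih (fun y hy => h y (by simp [hy]))]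

-- number of "1" entries among the first j cells (out-of-range cells read as "")
def onesBelow (row : List String) (j : Nat) : Int :=
  ((row.take j).countP (fun x => x == "1") : Int)

lemma onesBelow_succ (row : List String) (j : Nat) :
    onesBelow row (j + 1) = onesBelow row j + (if row.getD j "" == "1" then 1 else 0) := by
  unfold onesBelow
  rw [List.take_add_one, List.countP_append]
  cases hj : row[j]? with
  | none => simp [List.getD, hj]
  | some v => simp [List.getD, hj, List.countP_cons]

lemma onesBelow_sub_bounds (row : List String) (n w : Nat) :
    onesBelow row n ≤ onesBelow row (n + w) ∧ onesBelow row (n + w) ≤ onesBelow row n + w := by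
  induction w with
  | zero => simp
  | succ w ih =>
    have h := onesBelow_succ row (n + w)
    rw [show n + (w + 1) = (n + w) + 1 from rfl, h]
    split at h <;> (push_cast at *; omega)

-- a segment is all "1" iff its prefix-sum difference equals its length
lemma seg (row : List String) (n w : Nat) :
    ((List.range w).all fun b => row.getD (n + b) "" == "1")
      = (onesBelow row (n + w) - onesBelow row n == (w : Int)) := by
  induction w with
  | zero => simp
  | succ w ih =>
    rw [List.range_succ, List.all_append, ih]
    have hstep := onesBelow_succ row (n + w)
    have hbd := onesBelow_sub_bounds row n w
    rw [show n + (w + 1) = (n + w) + 1 from rfl, hstep, Bool.eq_iff_iff]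
    by_cases hg : row.getD (n + w) "" = "1"
    · simp only [hg, if_pos, beq_iff_eq, List.all_cons, List.all_nil, Bool.and_true,
        Bool.and_eq_true, and_true]
      push_cast
      omega
    · simp only [hg, beq_iff_eq, List.all_cons, List.all_nil, Bool.and_true, Bool.and_eq_true,
        and_false, if_false, false_iff]
      push_cast
      omega

-- the same fact for the Int-range all of the ports
lemma inner_eq (row : List String) (n w : Int) (hn : 0 ≤ n) (hw : 0 ≤ w) :
    ((PySem.List.pyRange 0 w 1).all fun b => PySem.List.pyGetD row (n + b) "" == "1")
      = (onesBelow row ((n + w).toNat) - onesBelow row n.toNat == w) := by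
  obtain ⟨n', rfl⟩ : ∃ n' : Nat, n = (n' : Int) := ⟨n.toNat, (Int.toNat_of_nonneg hn).symm⟩
  obtain ⟨w', rfl⟩ : ∃ w' : Nat, w = (w' : Int) := ⟨w.toNat, (Int.toNat_of_nonneg hw).symm⟩
  rw [PySem.List.pyRange_one]
  simp only [List.all_map, Function.comp_def, Int.sub_zero, Int.toNat_natCast]
  have h1 : ∀ b : Nat, (PySem.List.pyGetD row ((n' : Int) + ((0 : Int) + (b : Nat))) "" == "1")
      = (row.getD (n' + b) "" == "1") := by
    intro b
    have h2 : (n' : Int) + ((0 : Int) + (b : Nat)) = ((n' + b : Nat) : Int) := by push_cast; ring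
    rw [h2, PySem.List.pyGetD_natCast]
  rw [all_congr_mem (fun b _ => h1 b)]
  have hcast : ((n' : Int) + (w' : Int)).toNat = n' + w' := by omega
  rw [hcast]
  exact seg row n' w'

lemma rowPref_fold (row : List String) (C : Nat) :
    (PySem.List.pyRange 0 (C : Int) 1).foldl
      (fun (st : List Int × Int) c =>
        let s := st.2 + (if PySem.List.pyGetD row c "" == "1" then (1 : Int) else 0)
        (st.1 ++ [s], s))
      ([0], 0)
    = ((List.range (C + 1)).map (onesBelow row), onesBelow row C) := by
  induction C with
  | zero => simp [onesBelow]
  | succ C ih =>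
    rw [show ((C + 1 : Nat) : Int) = (C : Int) + 1 by push_cast; ring,
        PySem.List.pyRange_one_succ_right (by positivity), List.foldl_append, ih]
    simp only [List.foldl_cons, List.foldl_nil]
    rw [PySem.List.pyGetD_natCast]
    have h2 := onesBelow_succ row C
    rw [List.range_succ, List.map_append, ← h2]
    simp [List.range_succ]

lemma rowPref_eq (row : List String) (C : Nat) :
    rowPref row (C : Int) = (List.range (C + 1)).map (onesBelow row) := by
  unfold rowPref; rw [rowPref_fold]

-- range(a, 0, -1) visits the same values as i ↦ a - i over range(a)
lemma countdown_map (a : Int) :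
    PySem.List.pyRange a 0 (-1) = (PySem.List.pyRange 0 a 1).map (fun i => a - i) := by
  rw [PySem.List.pyRange_neg_one, PySem.List.pyRange_one, List.map_map]
  simp

lemma getD_map_range' (f : Nat → Int) (n k : Nat) (hk : k < n) :
    ((List.range n).map f).getD k 0 = f k := by
  rw [List.getD_eq_getElem _ _ (by simpa using hk)]
  simp

theorem solve_eq_alt (matrix : List (List String)) (res : List Int) :
    solve matrix res = solve_alt matrix res := by
  unfold solve solve_alt
  simp only []
  set R : Int := ((matrix.length : Nat) : Int) with hR
  set L : Nat := (PySem.List.pyGetD matrix 0 []).length with hL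
  have pref_eq : (PySem.List.pyRange 0 R 1).foldl
      (fun acc r => acc ++ [rowPref (PySem.List.pyGetD matrix r []) (L : Int)]) []
      = (PySem.List.pyRange 0 R 1).map (fun r => rowPref (PySem.List.pyGetD matrix r []) (L : Int)) := by
    rw [PySem.List.foldl_append_singleton_eq_map]; rfl
  rw [pref_eq, countdown_map R, countdown_map (L : Int), List.foldl_map]
  apply PySem.List.foldl_congr_mem
  intro acc i hi
  rw [List.foldl_map]
  apply PySem.List.foldl_congr_mem
  intro acc k hk
  simp only [sub_sub_cancel]
  apply PySem.List.foldl_congr_mem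
  intro acc m hm
  apply PySem.List.foldl_congr_mem
  intro acc n hn
  rw [PySem.List.mem_pyRange_one] at hi hk hm hn
  have hcond : judge matrix m n (R - i) ((L : Int) - k)
      = (PySem.List.pyRange 0 (R - i) 1).all (fun a =>
          PySem.List.pyGetD (PySem.List.pyGetD
            ((PySem.List.pyRange 0 R 1).map (fun r => rowPref (PySem.List.pyGetD matrix r []) (L : Int)))
            (m + a) []) (n + ((L : Int) - k)) 0
          - PySem.List.pyGetD (PySem.List.pyGetD
            ((PySem.List.pyRange 0 R 1).map (fun r => rowPref (PySem.List.pyGetD matrix r []) (L : Int)))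
            (m + a) []) n 0 == (L : Int) - k) := by
    unfold judge pvCell
    apply all_congr_mem
    intro a ha
    rw [PySem.List.mem_pyRange_one] at ha
    have hr1 : (0 : Int) ≤ m + a := by omega
    have hr2 : m + a < R := by omega
    rw [PySem.List.pyGetD_map_pyRange_of_nonneg _ _ _ _ hr1 hr2]
    set row := PySem.List.pyGetD matrix (m + a) [] with hrow
    rw [rowPref_eq row L]
    have hRHS1 : PySem.List.pyGetD ((List.range (L + 1)).map (onesBelow row)) (n + ((L : Int) - k)) 0
        = onesBelow row ((n + ((L : Int) - k)).toNat) := by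
      rw [show n + ((L : Int) - k) = (((n + ((L : Int) - k)).toNat : Nat) : Int) by omega,
        PySem.List.pyGetD_natCast, getD_map_range' _ _ _ (by omega)]
      congr 1
    have hRHS2 : PySem.List.pyGetD ((List.range (L + 1)).map (onesBelow row)) n 0
        = onesBelow row n.toNat := by
      rw [show n = ((n.toNat : Nat) : Int) by omega,
        PySem.List.pyGetD_natCast, getD_map_range' _ _ _ (by omega)]
      congr 1
    rw [hRHS1, hRHS2]
    exact inner_eq row n ((L : Int) - k) (by omega) (by omega)
  rw [hcond]

-- ===== VERDICT (by name: the statement is the Claim_ definition above) =====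
theorem solve_spec : Claim_equal_solve := by
  intro matrix res _ _
  unfold Spec_solve
  exact solve_eq_alt matrix res
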